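-- pv_equiv track=rewrite | github.com/BlackRoad-OS-Inc/blackroad-os-core | seed_ultimate_unified_cipher.py | strange_loop_transform
-- ===== SOURCE A (Python) =====
-- def strange_loop_transform(value: int, depth: int = 3) -> int:
--     """
--     GEB Strange Loop: Self-referential transformation
--
--     Level N refers to Level N+1, which refers back to Level N
--     Creates infinite regress that somehow produces finite output!
--     """
--     # Implement Hofstadter's G function (GEB classic)
--     # G(n) = n - G(G(n-1))
--
--     memo = {0: 0}
--
--     def G(n):
--         if n in memo:
--             return memo[n]
--         if n < 0:
--             return 0
--
--         result = n - G(G(n - 1))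
--         memo[n] = result % (2**64)  # Prevent overflow
--         return memo[n]
--
--     # Apply strange loop
--     result = value
--     for _ in range(depth):
--         result = G(result % 100)  # Limit input to G function
--
--     return result
-- ===== SOURCE B (Python) =====
-- def strange_loop_transform(value: int, depth: int = 3) -> int:
--     # Bottom-up tabulation of Hofstadter's G over 0..99, then iterate lookups.
--     g = [0]
--     for i in range(1, 100):
--         g.append((i - g[g[i - 1]]) % (2 ** 64))
--     result = value
--     for _ in range(depth):
--         result = g[result % 100]
--     return result
-- ===== Notes on version B (the rewrite author's own statement) =====
-- stated objective: faster
-- what changed: Replaces the memoized recursive G (a closure with a dict cache, recursion G(G(n-1))) by bottom-up iterative tabulation: one forward loop fills g[0..99], and each depth step becomes a direct list lookup.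
import Mathlib
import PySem

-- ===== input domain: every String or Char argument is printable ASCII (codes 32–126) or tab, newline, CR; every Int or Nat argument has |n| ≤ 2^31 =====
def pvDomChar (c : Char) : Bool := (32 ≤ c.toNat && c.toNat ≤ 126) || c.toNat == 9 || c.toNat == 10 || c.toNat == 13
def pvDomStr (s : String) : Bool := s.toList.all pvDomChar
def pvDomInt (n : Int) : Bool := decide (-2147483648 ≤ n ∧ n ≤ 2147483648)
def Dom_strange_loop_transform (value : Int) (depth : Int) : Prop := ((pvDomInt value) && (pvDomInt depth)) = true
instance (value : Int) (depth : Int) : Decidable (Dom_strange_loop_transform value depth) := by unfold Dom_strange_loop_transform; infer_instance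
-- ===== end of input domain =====

-- B replaces A's memoized recursive G with a bottom-up table over 0..99 (different
-- decomposition: iterative tabulation instead of recursive memoization); equivalence of the
-- RETURN value is proved on the whole domain.

-- ===== PORT A =====
-- A's inner G is recursive through the memo dict; the recursion terminates in Python because
-- G(n-1) < n; here it is transliterated with a fuel parameter (fuel 200 is always sufficient
-- for the arguments A feeds it, n % 100 ≤ 99; fuel exhaustion is unreachable).
def pvG (fuel : Nat) (memo : PySem.Dict Int Int) (n : Int) : Int × PySem.Dict Int Int :=
  match fuel with
  | 0 => (0, memo)  -- unreachable with the fuel used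
  | fuel + 1 =>
    match memo.get? n with
    | some v => (v, memo)                                   -- if n in memo: return memo[n]
    | none =>
      if n < 0 then (0, memo)                               -- if n < 0: return 0
      else
        let p1 := pvG fuel memo (n - 1)                     -- G(n - 1)
        let p2 := pvG fuel p1.2 p1.1                        -- G(G(n - 1))
        let result := n - p2.1
        let memo3 := p2.2.insert n (PySem.Int.mod result (2 ^ 64))  -- memo[n] = result % 2**64
        (memo3.getD n 0, memo3)                             -- return memo[n]

def strange_loop_transform (value : Int) (depth : Int) : Int :=
  let memo : PySem.Dict Int Int := PySem.Dict.ofList [(0, 0)]   -- memo = {0: 0}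
  -- for _ in range(depth): result = G(result % 100)
  ((PySem.List.pyRange 0 depth 1).foldl
      (fun st _ => pvG 200 st.2 (PySem.Int.mod st.1 100))
      (value, memo)).1

-- ===== PORT B =====
def strange_loop_transform_alt (value : Int) (depth : Int) : Int :=
  -- g = [0]; for i in range(1, 100): g.append((i - g[g[i-1]]) % 2**64)
  let g : List Int :=
    (PySem.List.pyRange 1 100 1).foldl
      (fun g i =>
        g ++ [PySem.Int.mod (i - PySem.List.pyGetD g (PySem.List.pyGetD g (i - 1) 0) 0) (2 ^ 64)])
      [0]
  -- result = value; for _ in range(depth): result = g[result % 100]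
  (PySem.List.pyRange 0 depth 1).foldl
    (fun r _ => PySem.List.pyGetD g (PySem.Int.mod r 100) 0) value

-- ===== PRECONDITION & SPEC =====
def Spec_strange_loop_transform (value : Int) (depth : Int) (out : Int) : Prop := out = strange_loop_transform_alt value depth
instance (value : Int) (depth : Int) (out : Int) : Decidable (Spec_strange_loop_transform value depth out) := by unfold Spec_strange_loop_transform; infer_instance

-- ===== CLAIM (what is proved, stated in full; the proofs are below) =====
def Claim_equal_strange_loop_transform : Prop := ∀ (value : Int) (depth : Int), Dom_strange_loop_transform value depth → Spec_strange_loop_transform value depth (strange_loop_transform value depth)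

-- ===== LEMMAS AND PROOFS =====

-- B's table, named for the proofs, and its literal value.
def gTable : List Int :=
  (PySem.List.pyRange 1 100 1).foldl
    (fun g i =>
      g ++ [PySem.Int.mod (i - PySem.List.pyGetD g (PySem.List.pyGetD g (i - 1) 0) 0) (2 ^ 64)])
    [0]

def gLit : List Int :=
  [0, 1, 1, 2, 3, 3, 4, 4, 5, 6, 6, 7, 8, 8, 9, 9, 10, 11, 11, 12, 12, 13, 14, 14, 15, 16, 16,
   17, 17, 18, 19, 19, 20, 21, 21, 22, 22, 23, 24, 24, 25, 25, 26, 27, 27, 28, 29, 29, 30, 30,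
   31, 32, 32, 33, 33, 34, 35, 35, 36, 37, 37, 38, 38, 39, 40, 40, 41, 42, 42, 43, 43, 44, 45,
   45, 46, 46, 47, 48, 48, 49, 50, 50, 51, 51, 52, 53, 53, 54, 55, 55, 56, 56, 57, 58, 58, 59,
   59, 60, 61, 61]

-- the mathematical G on 0..99, read off B's table
def gv (n : Int) : Int := PySem.List.pyGetD gLit n 0

set_option maxRecDepth 4096 in
theorem gTable_eq_gLit : gTable = gLit := by decide

-- bounds of the table, checked by computation
set_option maxRecDepth 8192 in
theorem gv_bounds : ∀ k : Nat, k < 100 → 0 ≤ gv (k : Int) ∧ gv (k : Int) ≤ (k : Int) := by decide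

-- the Hofstadter recurrence (with A's % 2**64, which is the identity here), checked by computation
set_option maxRecDepth 8192 in
theorem gv_rec : ∀ k : Nat, k < 100 → 1 ≤ k →
    PySem.Int.mod ((k : Int) - gv (gv ((k : Int) - 1))) (2 ^ 64) = gv (k : Int) := by decide

theorem gv_bounds_int (n : Int) (h0 : 0 ≤ n) (h1 : n < 100) : 0 ≤ gv n ∧ gv n ≤ n := by
  have : n = ((n.toNat : Nat) : Int) := by omega
  rw [this]; exact gv_bounds n.toNat (by omega)

theorem gv_rec_int (n : Int) (h0 : 1 ≤ n) (h1 : n < 100) :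
    PySem.Int.mod (n - gv (gv (n - 1))) (2 ^ 64) = gv n := by
  have : n = ((n.toNat : Nat) : Int) := by omega
  rw [this]; exact gv_rec n.toNat (by omega) (by omega)

-- invariant on A's memo: key 0 holds 0, and every entry is a correct G value with key in [0,100)
def pvInv (m : PySem.Dict Int Int) : Prop :=
  m.get? 0 = some 0 ∧ ∀ k v, m.get? k = some v → 0 ≤ k ∧ k < 100 ∧ v = gv k

theorem pvInv_insert {m : PySem.Dict Int Int} (h : pvInv m) {n : Int}
    (h0 : 0 ≤ n) (h1 : n < 100) : pvInv (m.insert n (gv n)) := by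
  constructor
  · by_cases hn : (0 : Int) = n
    · subst hn
      have : gv 0 = 0 := by decide
      rw [PySem.Dict.get?_insert_self, this]
    · rw [PySem.Dict.get?_insert_of_ne _ _ hn]; exact h.1
  · intro k v hk
    by_cases hkn : k = n
    · subst hkn
      rw [PySem.Dict.get?_insert_self] at hk
      exact ⟨h0, h1, (Option.some.inj hk).symm⟩
    · rw [PySem.Dict.get?_insert_of_ne _ _ hkn] at hk
      exact h.2 k v hk

-- the correctness of A's memoized G under the invariant, by induction on fuel
theorem pvG_correct : ∀ (fuel : Nat) (m : PySem.Dict Int Int) (n : Int),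
    pvInv m → 0 ≤ n → n < 100 → n.toNat + 1 ≤ fuel →
    (pvG fuel m n).1 = gv n ∧ pvInv (pvG fuel m n).2 := by
  intro fuel
  induction fuel with
  | zero => intro m n _ _ _ hf; omega
  | succ f ih =>
    intro m n hm h0 h1 hf
    unfold pvG
    cases hg : m.get? n with
    | some v =>
      simp only
      exact ⟨(hm.2 n v hg).2.2, hm⟩
    | none =>
      simp only
      have hnlt : ¬ n < 0 := by omega
      rw [if_neg hnlt]
      by_cases hn0 : n = 0
      · exact absurd hg (by rw [hn0, hm.1]; simp)
      · -- n ≥ 1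
        have hn1 : 1 ≤ n := by omega
        have ih1 := ih m (n - 1) hm (by omega) (by omega) (by omega)
        have hb1 := gv_bounds_int (n - 1) (by omega) (by omega)
        have ih2 := ih (pvG f m (n - 1)).2 (pvG f m (n - 1)).1
          ih1.2 (by rw [ih1.1]; exact hb1.1)
          (by rw [ih1.1]; omega)
          (by rw [ih1.1]; omega)
        rw [ih1.1] at ih2
        constructor
        · simp only
          rw [ih1.1, ih2.1, gv_rec_int n hn1 h1, PySem.Dict.getD_insert_self]
        · simp only
          rw [ih1.1, ih2.1, gv_rec_int n hn1 h1]
          exact pvInv_insert ih2.2 h0 h1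

-- the two depth-loops agree on any iteration list, carrying the invariant
theorem loops_agree : ∀ (L : List Int) (r : Int) (m : PySem.Dict Int Int), pvInv m →
    (L.foldl (fun st (_ : Int) => pvG 200 st.2 (PySem.Int.mod st.1 100)) (r, m)).1
      = L.foldl (fun r' _ => PySem.List.pyGetD gLit (PySem.Int.mod r' 100) 0) r := by
  intro L
  induction L with
  | nil => intro r m _; rfl
  | cons x xs ih =>
    intro r m hm
    simp only [List.foldl_cons]
    have h0 : 0 ≤ PySem.Int.mod r 100 := PySem.Int.mod_nonneg r (by norm_num)
    have h1 : PySem.Int.mod r 100 < 100 := PySem.Int.mod_lt r (by norm_num)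
    have hG := pvG_correct 200 m (PySem.Int.mod r 100) hm h0 h1 (by omega)
    have := ih (pvG 200 m (PySem.Int.mod r 100)).1 (pvG 200 m (PySem.Int.mod r 100)).2 hG.2
    rw [show (pvG 200 m (PySem.Int.mod r 100)) = ((pvG 200 m (PySem.Int.mod r 100)).1, (pvG 200 m (PySem.Int.mod r 100)).2) from rfl] at this ⊢
    rw [this, hG.1]
    rfl

theorem pvInv_init : pvInv (PySem.Dict.ofList [(0, 0)]) := by
  rw [show (PySem.Dict.ofList [((0 : Int), (0 : Int))]) = PySem.Dict.mk [(0, 0)] from by decide]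
  constructor
  · decide
  · intro k v hk
    rw [PySem.Dict.get?_mk_cons] at hk
    by_cases h : ((0 : Int) == k)
    · rw [if_pos h] at hk
      have hk0 : k = 0 := (beq_iff_eq.mp h).symm
      have hv : v = 0 := (Option.some.inj hk).symm
      subst hk0; subst hv
      exact ⟨le_refl 0, by norm_num, by decide⟩
    · rw [if_neg h] at hk
      simp [PySem.Dict.get?] at hk

-- ===== VERDICT (by name: the statement is the Claim_ definition above) =====
theorem strange_loop_transform_spec : Claim_equal_strange_loop_transform := by
  intro value depth _
  unfold Spec_strange_loop_transform strange_loop_transform strange_loop_transform_alt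
  rw [show ((PySem.List.pyRange 1 100 1).foldl
      (fun g i =>
        g ++ [PySem.Int.mod (i - PySem.List.pyGetD g (PySem.List.pyGetD g (i - 1) 0) 0) (2 ^ 64)])
      [0]) = gTable from rfl, gTable_eq_gLit]
  exact loops_agree (PySem.List.pyRange 0 depth 1) value (PySem.Dict.ofList [(0, 0)]) pvInv_init
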